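-- pv_equiv track=rewrite | github.com/Fa1bu/Shop | flask-store/app.py | get_order_status_timeline
-- ===== SOURCE A (Python) =====
-- ORDER_STATUS_FLOW = [
--     ('pending', 'В обработке'),
--     ('processing', 'Подготовка к отправке'),
--     ('shipped', 'В пути'),
--     ('delivered', 'Доставлен'),
--     ('completed', 'Завершен')
-- ]
--
-- ORDER_STATUS_LABELS = {key: label for key, label in ORDER_STATUS_FLOW}
--
-- def get_order_status_timeline(current_status):
--     status = current_status or 'pending'
--     if status == 'cancelled':
--         return [{
--             'key': 'cancelled',
--             'label': ORDER_STATUS_LABELS.get('cancelled', 'Отменен'),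
--             'state': 'cancelled'
--         }]
--     timeline = []
--     current_index = None
--     for idx, (key, _) in enumerate(ORDER_STATUS_FLOW):
--         if key == status:
--             current_index = idx
--             break
--     if current_index is None:
--         current_index = len(ORDER_STATUS_FLOW) - 1
--     for idx, (key, label) in enumerate(ORDER_STATUS_FLOW):
--         if idx < current_index:
--             state = 'completed'
--         elif idx == current_index:
--             state = 'current'
--         else:
--             state = 'upcoming'
--         timeline.append({
--             'key': key,
--             'label': label,
--             'state': state
--         })
--     return timeline
-- ===== SOURCE B (Python) =====
-- ORDER_STATUS_FLOW = [
--     ('pending', 'В обработке'),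
--     ('processing', 'Подготовка к отправке'),
--     ('shipped', 'В пути'),
--     ('delivered', 'Доставлен'),
--     ('completed', 'Завершен')
-- ]
--
-- ORDER_STATUS_LABELS = {key: label for key, label in ORDER_STATUS_FLOW}
--
-- def get_order_status_timeline(current_status):
--     status = current_status or 'pending'
--     if status == 'cancelled':
--         return [{
--             'key': 'cancelled',
--             'label': ORDER_STATUS_LABELS.get('cancelled', 'Отменен'),
--             'state': 'cancelled'
--         }]
--     if status not in ORDER_STATUS_LABELS:
--         status = ORDER_STATUS_FLOW[-1][0]
--     timeline = []
--     seen = False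
--     for key, label in ORDER_STATUS_FLOW:
--         if key == status:
--             state = 'current'
--             seen = True
--         elif seen:
--             state = 'upcoming'
--         else:
--             state = 'completed'
--         timeline.append({'key': key, 'label': label, 'state': state})
--     return timeline
-- ===== Notes on version B (the rewrite author's own statement) =====
-- stated objective: simpler
-- what changed: Replaces A's two-pass structure (find-index loop over the flow, then a second loop comparing each position to that index) with status normalization (unknown statuses become the last flow key) and a single pass over the flow carrying a seen-flag that switches the emitted state from completed to current to upcoming.
import Mathlib
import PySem

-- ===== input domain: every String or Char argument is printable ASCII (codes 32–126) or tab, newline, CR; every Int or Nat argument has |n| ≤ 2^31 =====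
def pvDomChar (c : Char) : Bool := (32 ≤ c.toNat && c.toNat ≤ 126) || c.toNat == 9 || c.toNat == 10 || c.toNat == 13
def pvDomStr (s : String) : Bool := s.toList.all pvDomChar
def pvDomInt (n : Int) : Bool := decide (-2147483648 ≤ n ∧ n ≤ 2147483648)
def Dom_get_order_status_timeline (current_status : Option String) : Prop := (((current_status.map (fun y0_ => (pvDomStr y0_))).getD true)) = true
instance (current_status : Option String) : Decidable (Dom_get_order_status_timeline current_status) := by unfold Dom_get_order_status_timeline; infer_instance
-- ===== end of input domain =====

-- B replaces A's find-index-pass-then-compare structure by status normalization plus a single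
-- pass with a seen-flag (objective: simpler/alternative decomposition, same cost).

-- module constant ORDER_STATUS_FLOW
def pvFlow : List (String × String) :=
  [("pending", "В обработке"),
   ("processing", "Подготовка к отправке"),
   ("shipped", "В пути"),
   ("delivered", "Доставлен"),
   ("completed", "Завершен")]

-- module constant ORDER_STATUS_LABELS = {key: label for key, label in ORDER_STATUS_FLOW}
def pvLabels : PySem.Dict String String :=
  pvFlow.foldl (fun d kl => d.insert kl.1 kl.2) PySem.Dict.empty

-- ===== PORT A =====
-- the first loop of A: scan enumerate(ORDER_STATUS_FLOW), break at the first key == status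
def pvFindIdxA (xs : List (Int × (String × String))) (status : String) : Option Int :=
  match xs with
  | [] => none
  | (idx, kl) :: rest => if kl.1 == status then some idx else pvFindIdxA rest status

def get_order_status_timeline (current_status : Option String) : List (List (String × String)) :=
  let status := match current_status with
    | none => "pending"
    | some s => if s == "" then "pending" else s   -- `current_status or 'pending'`
  if status == "cancelled" then
    [[("key", "cancelled"),
      ("label", (PySem.Dict.get? pvLabels "cancelled").getD "Отменен"),
      ("state", "cancelled")]]
  else
    let current_index : Int :=
      match pvFindIdxA (PySem.List.enumerate pvFlow) status with
      | some i => i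
      | none => (pvFlow.length : Int) - 1
    (PySem.List.enumerate pvFlow).foldl (fun timeline p =>
      let state := if p.1 < current_index then "completed"
                   else if p.1 == current_index then "current"
                   else "upcoming"
      timeline ++ [[("key", p.2.1), ("label", p.2.2), ("state", state)]]) []

-- ===== PORT B =====
def get_order_status_timeline_alt (current_status : Option String) : List (List (String × String)) :=
  let status := match current_status with
    | none => "pending"
    | some s => if s == "" then "pending" else s
  if status == "cancelled" then
    [[("key", "cancelled"),
      ("label", (PySem.Dict.get? pvLabels "cancelled").getD "Отменен"),
      ("state", "cancelled")]]
  else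
    let status := if pvLabels.contains status then status else (PySem.List.pyGet? pvFlow (-1)).elim "" (·.1)
    (pvFlow.foldl (fun (st : Bool × List (List (String × String))) kl =>
      if kl.1 == status then
        (true, st.2 ++ [[("key", kl.1), ("label", kl.2), ("state", "current")]])
      else if st.1 then
        (st.1, st.2 ++ [[("key", kl.1), ("label", kl.2), ("state", "upcoming")]])
      else
        (st.1, st.2 ++ [[("key", kl.1), ("label", kl.2), ("state", "completed")]]))
      (false, [])).2

-- ===== PRECONDITION & SPEC =====
def Spec_get_order_status_timeline (current_status : Option String) (out : List (List (String × String))) : Prop := out = get_order_status_timeline_alt current_status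
instance (current_status : Option String) (out : List (List (String × String))) : Decidable (Spec_get_order_status_timeline current_status out) := by unfold Spec_get_order_status_timeline; infer_instance

-- ===== CLAIM (what is proved, stated in full; the proofs are below) =====
def Claim_equal_get_order_status_timeline : Prop := ∀ (current_status : Option String), Dom_get_order_status_timeline current_status → Spec_get_order_status_timeline current_status (get_order_status_timeline current_status)

-- ===== LEMMAS AND PROOFS =====
theorem pv_core (s : String) (h0 : s ≠ "") (hc : s ≠ "cancelled") (h1 : s ≠ "pending")
    (h2 : s ≠ "processing") (h3 : s ≠ "shipped") (h4 : s ≠ "delivered") (h5 : s ≠ "completed") :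
    get_order_status_timeline (some s) = get_order_status_timeline_alt (some s) := by
  simp [get_order_status_timeline, get_order_status_timeline_alt, pvFindIdxA, pvFlow, pvLabels,
    PySem.List.enumerate, PySem.List.pyGet?, PySem.List.pyIdx?, PySem.Dict.contains,
    PySem.Dict.insert, PySem.Dict.empty, h0, hc,
    Ne.symm h1, Ne.symm h2, Ne.symm h3, Ne.symm h4, Ne.symm h5]

-- ===== VERDICT (by name: the statement is the Claim_ definition above) =====
theorem get_order_status_timeline_spec : Claim_equal_get_order_status_timeline := by
  intro cs _
  unfold Spec_get_order_status_timeline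
  match cs with
  | none => decide
  | some s =>
    by_cases h0 : s = ""; · subst h0; decide
    by_cases hc : s = "cancelled"; · subst hc; decide
    by_cases h1 : s = "pending"; · subst h1; decide
    by_cases h2 : s = "processing"; · subst h2; decide
    by_cases h3 : s = "shipped"; · subst h3; decide
    by_cases h4 : s = "delivered"; · subst h4; decide
    by_cases h5 : s = "completed"; · subst h5; decide
    exact pv_core s h0 hc h1 h2 h3 h4 h5
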